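-- pv_equiv track=rewrite | github.com/tomf0333/N2T_JackCompiler | JackCompiler.py | rid_of_spaces
-- ===== SOURCE A (Python) =====
-- GARBAGE = "<>"
--
-- ALL_TOKENS = {"keyword": ["class", "constructor", "function", "method", "field", "static", "var",
--                           "int", "char", "boolean", "void", "true", "false", "null", "this",
--                           "let", "do", "if", "else", "while", "return"],
--               "symbol": ["{", "}", "(", ")", "[", "]", ".", ",", ";", "+", "-", "*", "/", "&",
--                          "|", "<", ">", "=", "~"],
--               "op": ["+", "-", "*", "/", "&", "|", "<", ">", "="],
--               "keyConst": ["true", "false", "null", "this"],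
--               "statements": ["let", "if", "while", "do", "return"],
--               "unary": ["~", "-"],
--               "type": ["int", "char", "boolean"],
--               "subroutine": ["constructor", "function", "method"],
--               "class": ["static", "field"]}
--
-- def rid_of_spaces(st):
--     new_st = ""
--     add_space = False
--     for sym in ALL_TOKENS["symbol"]:
--         if sym in st:
--             st = st.replace(sym, " " + sym + " ")
--     # get rid of all spaces
--     i = 0
--     while i < len(st):
--         if st[i] == "\"":
--             if add_space is True:
--                 new_st += " "
--                 add_space = False
--             index = st[i + 1:].index("\"")
--             new_st += st[i:i + index + 2].replace(" ", GARBAGE)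
--             i += index + 2
--             continue
--         if st[i] == " " or st[i] == "\t" or st[i] == "\n" or st[i] == "\r":
--             add_space = True
--             i += 1
--             continue
--         if add_space is True:
--             new_st += " "
--             add_space = False
--         new_st += st[i]
--         i += 1
--     if len(new_st) > 0 and new_st[-1] != " ":
--         new_st += " "
--     return new_st
-- ===== SOURCE B (Python) =====
-- GARBAGE = "<>"
--
-- SYMBOLS = ["{", "}", "(", ")", "[", "]", ".", ",", ";", "+", "-", "*", "/", "&",
--            "|", "<", ">", "=", "~"]
--
-- def rid_of_spaces(st):
--     for sym in SYMBOLS: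
--         if sym in st:
--             st = st.replace(sym, " " + sym + " ")
--     # split into alternating non-quoted / quoted segments
--     parts = st.split('"')
--     if len(parts) % 2 == 0:
--         raise ValueError("unterminated string constant")
--     pieces = []
--     for k, seg in enumerate(parts):
--         if k % 2 == 1:
--             # quoted segment: hide only literal spaces
--             pieces.append('"' + seg.replace(" ", GARBAGE) + '"')
--         else:
--             # collapse each whitespace run to a single space
--             collapsed = []
--             in_ws = False
--             for c in seg:
--                 if c in " \t\n\r":
--                     if not in_ws:
--                         collapsed.append(" ")
--                     in_ws = True
--                 else:
--                     collapsed.append(c)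
--                     in_ws = False
--             pieces.append("".join(collapsed))
--     out = "".join(pieces)
--     if out == " ":
--         return ""
--     if out and not out.endswith(" "):
--         out += " "
--     return out
-- ===== Notes on version B (the rewrite author's own statement) =====
-- stated objective: faster
-- what changed: Keeps the 19-symbol replace loop but replaces A's single stateful char-by-char scan (deferred add_space flag, manual index() jumps over string constants) by splitting the string on '"' into alternating code/quoted segments, collapsing whitespace runs per code segment, masking spaces per quoted segment, then joining and fixing the trailing space; the per-character Python loop with string concatenation becomes mostly C-level split/replace/join work.
import Mathlib
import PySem

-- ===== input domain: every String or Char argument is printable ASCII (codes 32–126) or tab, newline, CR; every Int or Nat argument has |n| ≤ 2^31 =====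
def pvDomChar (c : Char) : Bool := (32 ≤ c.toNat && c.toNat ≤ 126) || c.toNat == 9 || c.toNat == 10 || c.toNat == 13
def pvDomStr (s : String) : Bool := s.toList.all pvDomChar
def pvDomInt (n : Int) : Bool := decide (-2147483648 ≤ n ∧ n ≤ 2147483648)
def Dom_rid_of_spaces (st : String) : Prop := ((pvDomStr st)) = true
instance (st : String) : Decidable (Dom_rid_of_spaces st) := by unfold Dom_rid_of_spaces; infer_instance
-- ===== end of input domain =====

-- B replaces A's single stateful index-jumping per-char scan by split-on-quote + per-segment
-- whitespace collapsing (measured faster in a timing run: C-level split/join instead of a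
-- per-char Python loop); equivalence proved outside inputs with an odd number of '"',
-- on which both Pythons raise ValueError.

-- ===== PORT A =====
-- ALL_TOKENS["symbol"] (all 19 symbols are single characters)
def pvSymbols : List Char :=
  ['{', '}', '(', ')', '[', ']', '.', ',', ';', '+', '-', '*', '/', '&',
   '|', '<', '>', '=', '~']

-- st[i] == " " or "\t" or "\n" or "\r" (the same test both Pythons perform)
def pvWs (c : Char) : Bool := c == ' ' || c == '\t' || c == '\n' || c == '\r'

-- the symbol-replace loop, textually identical in A and B:
-- for sym in symbols: if sym in st: st = st.replace(sym, " " + sym + " ")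
def pvReplaceSyms (cs : List Char) : List Char :=
  pvSymbols.foldl
    (fun s sym =>
      if PySem.Chars.isIn [sym] s then PySem.Chars.replace s [sym] [' ', sym, ' '] else s)
    cs

-- A's while-loop over i, as recursion over the remaining characters with the same state
-- (add_space, and the output built left to right)
def ridScanA : List Char → Bool → List Char
  | [], _ => []
  | c :: rest, add =>
    if c == '"' then
      (if add then [' '] else []) ++
      (match PySem.List.index? rest '"' with
       | none => []  -- st[i+1:].index('"') raises ValueError here (outside Pre_)
       | some k => PySem.Chars.replace ('"' :: rest.take (k + 1)) [' '] ['<', '>']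
           ++ ridScanA (rest.drop (k + 1)) false)
    else if pvWs c then ridScanA rest true
    else (if add then [' '] else []) ++ c :: ridScanA rest false
termination_by cs _ => cs.length
decreasing_by all_goals (simp; try omega)

def rid_of_spaces (st : String) : String :=
  let stR := pvReplaceSyms st.toList
  let newSt := ridScanA stR false
  String.ofList (match newSt.getLast? with
    | none => newSt
    | some c => if c == ' ' then newSt else newSt ++ [' '])

-- ===== PORT B =====
-- collapse each whitespace run of a non-quoted segment to a single space (B's inner loop)
def pvCollapse : List Char → Bool → List Char
  | [], _ => []
  | c :: rest, inWs =>
    if pvWs c then (if inWs then [] else [' ']) ++ pvCollapse rest true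
    else c :: pvCollapse rest false

-- B's enumerate loop over the split parts: odd index = quoted segment
def pvProcParts : List (List Char) → Nat → List Char
  | [], _ => []
  | p :: ps, k =>
    (if k % 2 == 1 then '"' :: (PySem.Chars.replace p [' '] ['<', '>'] ++ ['"'])
     else pvCollapse p false) ++ pvProcParts ps (k + 1)

def rid_of_spaces_alt (st : String) : String :=
  let stR := pvReplaceSyms st.toList
  let parts := PySem.Chars.splitOn stR ['"']
  if parts.length % 2 == 0 then ""  -- B raises ValueError here (outside Pre_)
  else
    let out := pvProcParts parts 0
    if out == [' '] then ""
    else String.ofList (match out.getLast? with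
      | none => out
      | some c => if c == ' ' then out else out ++ [' '])

-- ===== PRECONDITION & SPEC =====
-- Pre_ excludes exactly the inputs with an odd number of '"' characters, on which A's
-- st[i+1:].index('"') raises ValueError (B's split-parity check also raises ValueError there).
def Pre_rid_of_spaces (st : String) : Prop := st.toList.count '"' % 2 = 0
instance (st : String) : Decidable (Pre_rid_of_spaces st) := by
  unfold Pre_rid_of_spaces; infer_instance

def pvWitness_rid_of_spaces : String := "let x = \"a b\" ;"

def Spec_rid_of_spaces (st : String) (out : String) : Prop := out = rid_of_spaces_alt st
instance (st : String) (out : String) : Decidable (Spec_rid_of_spaces st out) := by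
  unfold Spec_rid_of_spaces; infer_instance

-- ===== CLAIM (what is proved, stated in full; the proofs are below) =====
def Claim_equal_rid_of_spaces : Prop :=
  ∀ (st : String), Dom_rid_of_spaces st → Pre_rid_of_spaces st →
    Spec_rid_of_spaces st (rid_of_spaces st)

-- ===== LEMMAS AND PROOFS =====


-- proof-side mirror of B's split: split a char list on '"'
def pvSplitQ : List Char → List (List Char)
  | [] => [[]]
  | c :: rest =>
    if c == '"' then [] :: pvSplitQ rest
    else match pvSplitQ rest with
      | [] => [[c]]
      | p :: ps => (c :: p) :: ps

def pvConsH (p : List Char) : List (List Char) → List (List Char)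
  | [] => [p]
  | q :: qs => (p ++ q) :: qs

-- B's whole post-split pipeline, fused into one scan (proof vehicle)
def pvBscan : List Char → Bool → List Char
  | [], _ => []
  | c :: rest, prev =>
    if c == '"' then
      match PySem.List.index? rest '"' with
      | none => []
      | some k =>
        '"' :: (((rest.take k).flatMap (fun d => if d == ' ' then ['<', '>'] else [d])) ++ ['"'])
          ++ pvBscan (rest.drop (k + 1)) false
    else if pvWs c then (if prev then [] else [' ']) ++ pvBscan rest true
    else c :: pvBscan rest false
termination_by cs _ => cs.length
decreasing_by all_goals (simp; try omega)

-- A's final add_space state (whether trailing whitespace was left pending)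
def pvPend : List Char → Bool → Bool
  | [], add => add
  | c :: rest, add =>
    if c == '"' then
      match PySem.List.index? rest '"' with
      | none => false
      | some k => pvPend (rest.drop (k + 1)) false
    else if pvWs c then pvPend rest true
    else pvPend rest false
termination_by cs _ => cs.length
decreasing_by all_goals (simp; try omega)

def pvB0 (cs : List Char) (prev : Bool) : List Char :=
  match pvSplitQ cs with
  | [] => []
  | p :: ps => pvCollapse p prev ++ pvProcParts ps 1

-- replace with a single-char needle is a per-character flatMap
lemma pvReplaceGo (a : Char) (new : List Char) :
    ∀ fuel l acc, l.length ≤ fuel →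
      PySem.Chars.replace.go [a] new fuel l acc
        = acc.reverse ++ l.flatMap (fun c => if c == a then new else [c]) := by
  intro fuel
  induction fuel with
  | zero => intro l acc h; simp at h; subst h; simp [PySem.Chars.replace.go]
  | succ n ih =>
    intro l acc h
    cases l with
    | nil => simp [PySem.Chars.replace.go]
    | cons c t =>
      rw [PySem.Chars.replace.go]
      by_cases hc : c = a
      · subst hc
        have hp : [c].isPrefixOf (c :: t) = true := by simp [List.isPrefixOf]
        simp only [hp, if_true]
        rw [ih _ _ (by simpa using Nat.le_of_succ_le_succ h)]
        simp
      · have hp : [a].isPrefixOf (c :: t) = false := by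
          simp [List.isPrefixOf]; exact fun hh => (hc hh.symm).elim
        simp only [hp, Bool.false_eq_true, if_false]
        rw [ih _ _ (by simpa using Nat.le_of_succ_le_succ h)]
        simp [hc]

lemma pvReplaceChar (cs : List Char) (a : Char) (new : List Char) :
    PySem.Chars.replace cs [a] new = cs.flatMap (fun c => if c == a then new else [c]) := by
  rw [PySem.Chars.replace]
  simp only [List.isEmpty_cons, Bool.false_eq_true, if_false]
  exact pvReplaceGo a new cs.length cs [] (le_refl _)

lemma pvCountFlatMap (cs : List Char) (a : Char) (new : List Char)
    (ha : a ≠ '"') (hn : '"' ∉ new) :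
    (cs.flatMap (fun c => if c == a then new else [c])).count '"' = cs.count '"' := by
  induction cs with
  | nil => simp
  | cons c t iht =>
    simp only [List.flatMap_cons, List.count_append, iht]
    by_cases hc : c = a
    · simp [hc, List.count_eq_zero.2 hn, List.count_cons, Ne.symm ha]
      omega
    · simp [hc, List.count_cons]
      omega

lemma pvSymbols_ne_quote : ∀ x ∈ pvSymbols, x ≠ '"' := by
  intro x hx
  fin_cases hx <;> decide

lemma pvCountFold : ∀ (syms : List Char) (s : List Char), (∀ x ∈ syms, x ≠ '"') →
    ((syms.foldl (fun s sym =>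
      if PySem.Chars.isIn [sym] s then PySem.Chars.replace s [sym] [' ', sym, ' '] else s) s).count '"')
      = s.count '"' := by
  intro syms
  induction syms with
  | nil => intro s _; rfl
  | cons a t iht =>
    intro s hm
    have ha : a ≠ '"' := hm a (by simp)
    have step : ((if PySem.Chars.isIn [a] s then PySem.Chars.replace s [a] [' ', a, ' '] else s).count '"') = s.count '"' := by
      split_ifs with h
      · rw [pvReplaceChar, pvCountFlatMap s a _ ha (by intro hmem; simp at hmem; exact ha hmem.symm)]
      · rfl
    rw [List.foldl_cons, iht _ (fun x hx => hm x (by simp [hx])), step]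

lemma pvCountReplaceSyms (cs : List Char) :
    (pvReplaceSyms cs).count '"' = cs.count '"' :=
  pvCountFold pvSymbols cs pvSymbols_ne_quote

lemma pvSplitQ_ne_nil : ∀ cs, pvSplitQ cs ≠ [] := by
  intro cs
  cases cs with
  | nil => simp [pvSplitQ]
  | cons c rest =>
    simp only [pvSplitQ]
    split
    · simp
    · split <;> simp

lemma pvSplitGo :
    ∀ fuel l cur acc, l.length < fuel →
      PySem.Chars.splitOn.go ['"'] fuel l cur acc
        = acc.reverse ++ pvConsH cur.reverse (pvSplitQ l) := by
  intro fuel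
  induction fuel with
  | zero => intro l cur acc h; omega
  | succ n ih =>
    intro l cur acc h
    cases l with
    | nil => simp [PySem.Chars.splitOn.go, pvSplitQ, pvConsH]
    | cons c t =>
      rw [PySem.Chars.splitOn.go]
      by_cases hc : c = '"'
      · subst hc
        have hp : ['"'].isPrefixOf ('"' :: t) = true := by simp [List.isPrefixOf]
        simp only [hp, if_true]
        rw [ih _ _ _ (by simpa using Nat.lt_of_succ_lt_succ h)]
        simp only [pvSplitQ, beq_self_eq_true, if_true, List.reverse_cons]
        rcases hq : pvSplitQ t with _ | ⟨p, ps⟩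
        · exact absurd hq (pvSplitQ_ne_nil t)
        · simp [pvConsH, hq]
      · have hp : ['"'].isPrefixOf (c :: t) = false := by
          simp [List.isPrefixOf]; exact fun hh => (hc hh.symm).elim
        simp only [hp, Bool.false_eq_true, if_false]
        rw [ih _ _ _ (by simpa using Nat.lt_of_succ_lt_succ h)]
        simp only [pvSplitQ, List.reverse_cons]
        have hcb : (c == '"') = false := by simp [hc]
        simp only [hcb, Bool.false_eq_true, if_false]
        rcases hq : pvSplitQ t with _ | ⟨p, ps⟩
        · exact absurd hq (pvSplitQ_ne_nil t)
        · simp [pvConsH]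

lemma pvSplitOnQuote (cs : List Char) : PySem.Chars.splitOn cs ['"'] = pvSplitQ cs := by
  rw [PySem.Chars.splitOn, pvSplitGo (cs.length + 1) cs [] [] (by omega)]
  rcases hq : pvSplitQ cs with _ | ⟨p, ps⟩
  · exact absurd hq (pvSplitQ_ne_nil cs)
  · simp [pvConsH]

lemma pvSplitQ_length : ∀ cs : List Char, (pvSplitQ cs).length = cs.count '"' + 1 := by
  intro cs
  induction cs with
  | nil => simp [pvSplitQ]
  | cons c t iht =>
    simp only [pvSplitQ, List.count_cons]
    by_cases hc : c = '"'
    · simp [hc, iht]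
    · have hcb : (c == '"') = false := by simp [hc]
      simp only [hcb, Bool.false_eq_true, if_false]
      rcases hq : pvSplitQ t with _ | ⟨p, ps⟩
      · exact absurd hq (pvSplitQ_ne_nil t)
      · rw [hq] at iht; simp at iht ⊢; omega

lemma pvIdxSplit {rest : List Char} {k : Nat} (h : PySem.List.index? rest '"' = some k) :
    rest = rest.take k ++ '"' :: rest.drop (k + 1) ∧ '"' ∉ rest.take k ∧
      rest.take (k + 1) = rest.take k ++ ['"'] ∧
      rest.count '"' = (rest.drop (k + 1)).count '"' + 1 := by
  obtain ⟨pre, suf, hre, hlen, hnot⟩ := (PySem.List.index?_eq_some_iff rest '"' k).1 h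
  subst hlen
  have htake : rest.take pre.length = pre := by
    rw [hre]; simp [List.take_append]
  have hdrop : rest.drop (pre.length + 1) = suf := by
    rw [hre]; simp [List.drop_append]
  refine ⟨?_, ?_, ?_, ?_⟩
  · rw [htake, hdrop]; exact hre
  · rw [htake]; exact hnot
  · rw [htake, hre]; simp [List.take_append]
  · rw [hdrop, hre]
    simp [List.count_append, List.count_cons, List.count_eq_zero.2 hnot]

lemma pvSplitQ_append {suf : List Char} : ∀ pre : List Char, '"' ∉ pre →
    pvSplitQ (pre ++ '"' :: suf) = pre :: pvSplitQ suf := by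
  intro pre
  induction pre with
  | nil => intro _; simp [pvSplitQ]
  | cons c t iht =>
    intro hn
    have hc : c ≠ '"' := by intro hh; exact hn (by simp [hh])
    have hcb : (c == '"') = false := by simp [hc]
    simp only [List.cons_append, pvSplitQ, hcb, Bool.false_eq_true, if_false]
    rw [iht (fun hm => hn (by simp [hm]))]

lemma pvSplitQ_quote {rest : List Char} {k : Nat} (h : PySem.List.index? rest '"' = some k) :
    pvSplitQ rest = rest.take k :: pvSplitQ (rest.drop (k + 1)) := by
  obtain ⟨hre, hnot, _, _⟩ := pvIdxSplit h
  conv_lhs => rw [hre]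
  exact pvSplitQ_append _ hnot

lemma pvProcParts_parity : ∀ (ps : List (List Char)) (k k' : Nat), k % 2 = k' % 2 →
    pvProcParts ps k = pvProcParts ps k' := by
  intro ps
  induction ps with
  | nil => intro k k' _; rfl
  | cons p t iht =>
    intro k k' h
    simp only [pvProcParts]
    rw [show (k % 2 == 1) = (k' % 2 == 1) by rw [h], iht (k+1) (k'+1) (by omega)]

lemma pvB0_eq_bscan : ∀ (n : Nat) (cs : List Char) (prev : Bool), cs.length ≤ n →
    cs.count '"' % 2 = 0 → pvB0 cs prev = pvBscan cs prev := by
  intro n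
  induction n with
  | zero =>
    intro cs prev h _
    have : cs = [] := by cases cs <;> simp_all
    subst this
    simp [pvB0, pvSplitQ, pvCollapse, pvProcParts, pvBscan]
  | succ n ih =>
    intro cs prev h heven
    cases cs with
    | nil => simp [pvB0, pvSplitQ, pvCollapse, pvProcParts, pvBscan]
    | cons c rest =>
      by_cases hc : c = '"'
      · subst hc
        rcases hidx : PySem.List.index? rest '"' with _ | k
        · exfalso
          have : '"' ∉ rest := (PySem.List.index?_eq_none_iff rest '"').1 hidx
          have h0 : rest.count '"' = 0 := List.count_eq_zero.2 this
          simp [List.count_cons, h0] at heven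
        · obtain ⟨_, _, _, hcnt⟩ := pvIdxSplit hidx
          have hevend : (rest.drop (k+1)).count '"' % 2 = 0 := by
            simp [List.count_cons] at heven; omega
          have hlen : (rest.drop (k+1)).length ≤ n := by
            simp at h ⊢; omega
          have hB0 : pvProcParts (pvSplitQ (rest.drop (k+1))) 0 = pvB0 (rest.drop (k+1)) false := by
            rcases hq : pvSplitQ (rest.drop (k+1)) with _ | ⟨p, ps⟩
            · exact absurd hq (pvSplitQ_ne_nil _)
            · simp [pvB0, hq, pvProcParts]
          rw [pvBscan]
          simp only [beq_self_eq_true, if_true, hidx]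
          rw [pvB0]
          simp only [pvSplitQ, beq_self_eq_true, if_true]
          rw [pvSplitQ_quote hidx]
          simp only [pvCollapse, pvProcParts, List.nil_append]
          rw [pvProcParts_parity _ 2 0 (by omega), hB0, ih _ _ hlen hevend]
          rw [pvReplaceChar]
          simp [pvBscan, List.append_assoc]
      · have hcb : (c == '"') = false := by simp [hc]
        rcases hq : pvSplitQ rest with _ | ⟨p, ps⟩
        · exact absurd hq (pvSplitQ_ne_nil _)
        have heven' : rest.count '"' % 2 = 0 := by
          simp [List.count_cons, hc] at heven; omega
        have hlen : rest.length ≤ n := by simp at h; omega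
        have hB0r : pvB0 rest = fun pv => pvCollapse p pv ++ pvProcParts ps 1 := by
          funext pv; simp [pvB0, hq]
        by_cases hw : pvWs c = true
        · rw [pvBscan]
          simp only [hcb, Bool.false_eq_true, if_false, hw, if_true]
          rw [pvB0]
          simp only [pvSplitQ, hcb, Bool.false_eq_true, if_false, hq]
          simp only [pvCollapse, hw, if_true]
          rw [← ih rest true hlen heven', hB0r]
          simp [List.append_assoc]
        · rw [pvBscan]
          simp only [hcb, Bool.false_eq_true, if_false, hw, if_false]
          rw [pvB0]
          simp only [pvSplitQ, hcb, Bool.false_eq_true, if_false, hq]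
          simp only [pvCollapse, hw, Bool.false_eq_true, if_false]
          rw [← ih rest false hlen heven', hB0r]
          simp

lemma pvH : ∀ (n : Nat) (cs : List Char) (add : Bool), cs.length ≤ n →
    cs.count '"' % 2 = 0 →
    (if add then [' '] else []) ++ pvBscan cs add
      = ridScanA cs add ++ (if pvPend cs add then [' '] else []) := by
  intro n
  induction n with
  | zero =>
    intro cs add h _
    have : cs = [] := by cases cs <;> simp_all
    subst this
    simp [pvBscan, ridScanA, pvPend]
  | succ n ih =>
    intro cs add h heven
    cases cs with
    | nil => simp [pvBscan, ridScanA, pvPend]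
    | cons c rest =>
      by_cases hc : c = '"'
      · subst hc
        rcases hidx : PySem.List.index? rest '"' with _ | k
        · exfalso
          have : '"' ∉ rest := (PySem.List.index?_eq_none_iff rest '"').1 hidx
          have h0 : rest.count '"' = 0 := List.count_eq_zero.2 this
          simp [List.count_cons, h0] at heven
        · obtain ⟨_, _, htk, hcnt⟩ := pvIdxSplit hidx
          have hevend : (rest.drop (k+1)).count '"' % 2 = 0 := by
            simp [List.count_cons] at heven; omega
          have hlen : (rest.drop (k+1)).length ≤ n := by simp at h ⊢; omega
          have ihd := ih (rest.drop (k+1)) false hlen hevend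
          simp only [if_neg Bool.false_ne_true, List.nil_append] at ihd
          rw [pvBscan, ridScanA, pvPend]
          simp only [beq_self_eq_true, if_true, hidx]
          rw [pvReplaceChar, htk]
          simp only [List.flatMap_cons, List.flatMap_append]
          rw [ihd]
          simp [List.append_assoc]
      · have hcb : (c == '"') = false := by simp [hc]
        by_cases hw : pvWs c = true
        · have ihr := ih rest true (by simp at h; omega)
            (by simp [List.count_cons, hc] at heven; omega)
          simp only [if_pos rfl] at ihr
          rw [pvBscan, ridScanA, pvPend]
          simp only [hcb, Bool.false_eq_true, if_false, hw, if_true]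
          cases add <;> simp only [if_true, if_neg Bool.false_ne_true, List.nil_append,
            List.append_nil] <;> simpa using ihr
        · have ihr := ih rest false (by simp at h; omega)
            (by simp [List.count_cons, hc] at heven; omega)
          simp only [if_neg Bool.false_ne_true, List.nil_append] at ihr
          rw [pvBscan, ridScanA, pvPend]
          simp only [hcb, Bool.false_eq_true, if_false, hw, if_false]
          rw [ihr]
          cases add <;> simp

lemma pvNL : ∀ (n : Nat) (cs : List Char) (add : Bool), cs.length ≤ n →
    cs.count '"' % 2 = 0 → (ridScanA cs add).getLast? ≠ some ' ' := by
  intro n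
  induction n with
  | zero =>
    intro cs add h _
    have : cs = [] := by cases cs <;> simp_all
    subst this
    simp [ridScanA]
  | succ n ih =>
    intro cs add h heven
    cases cs with
    | nil => simp [ridScanA]
    | cons c rest =>
      by_cases hc : c = '"'
      · subst hc
        rcases hidx : PySem.List.index? rest '"' with _ | k
        · exfalso
          have : '"' ∉ rest := (PySem.List.index?_eq_none_iff rest '"').1 hidx
          have h0 : rest.count '"' = 0 := List.count_eq_zero.2 this
          simp [h0] at heven
        · obtain ⟨_, _, htk, hcnt⟩ := pvIdxSplit hidx
          have hevend : (rest.drop (k+1)).count '"' % 2 = 0 := by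
            simp at heven; omega
          have hlen : (rest.drop (k+1)).length ≤ n := by simp at h ⊢; omega
          rw [ridScanA]
          simp only [beq_self_eq_true, if_true, hidx]
          rw [pvReplaceChar, htk]
          have hqs : ('"' == ' ') = false := by decide
          have hrep : ((('"' :: (rest.take k ++ ['"'])).flatMap
              (fun c => if c == ' ' then ['<', '>'] else [c])).getLast? : Option Char)
              = some '"' := by
            simp only [List.flatMap_cons, List.flatMap_append, hqs, Bool.false_eq_true,
              if_false, List.flatMap_nil, List.append_nil]
            rw [← List.append_assoc, List.getLast?_concat]
          simp only [List.getLast?_append, hrep]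
          rcases hrec : (ridScanA (rest.drop (k+1)) false).getLast? with _ | d
          · simp
          · have hihd := ih (rest.drop (k+1)) false hlen hevend
            rw [hrec] at hihd
            simpa using hihd
      · have hcb : (c == '"') = false := by simp [hc]
        by_cases hw : pvWs c = true
        · rw [ridScanA]
          simp only [hcb, Bool.false_eq_true, if_false, hw, if_true]
          exact ih rest true (by simp at h; omega)
            (by simp [hc] at heven; omega)
        · rw [ridScanA]
          simp only [hcb, Bool.false_eq_true, if_false, hw, if_false]
          have hcsp : c ≠ ' ' := by
            intro hh; rw [hh] at hw; simp [pvWs] at hw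
          have hcons : (c :: ridScanA rest false) = [c] ++ ridScanA rest false := rfl
          rw [hcons]
          simp only [List.getLast?_append]
          rcases hrec : (ridScanA rest false).getLast? with _ | d
          · simpa using hcsp
          · have hihd := ih rest false (by simp at h; omega)
              (by simp [hc] at heven; omega)
            rw [hrec] at hihd
            simpa using hihd

-- ===== VERDICT (by name: the statement is the Claim_ definition above) =====
theorem rid_of_spaces_spec : Claim_equal_rid_of_spaces := by
  intro st _ hpre
  unfold Spec_rid_of_spaces rid_of_spaces rid_of_spaces_alt
  dsimp only
  have heven : (pvReplaceSyms st.toList).count '"' % 2 = 0 := by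
    rw [pvCountReplaceSyms]; exact hpre
  set cs := pvReplaceSyms st.toList with hcs
  have hodd : (((PySem.Chars.splitOn cs ['"']).length % 2 == 0) : Bool) = false := by
    rw [pvSplitOnQuote, pvSplitQ_length]
    simp; omega
  rw [hodd, pvSplitOnQuote]
  simp only [Bool.false_eq_true, if_false]
  have h0 : pvProcParts (pvSplitQ cs) 0 = pvB0 cs false := by
    rcases hq : pvSplitQ cs with _ | ⟨p, ps⟩
    · exact absurd hq (pvSplitQ_ne_nil _)
    · simp [pvB0, hq, pvProcParts]
  have hB : pvProcParts (pvSplitQ cs) 0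
      = ridScanA cs false ++ (if pvPend cs false then [' '] else []) := by
    rw [h0, pvB0_eq_bscan cs.length cs false (le_refl _) heven]
    have hh := pvH cs.length cs false (le_refl _) heven
    simpa using hh
  have hNL := pvNL cs.length cs false (le_refl _) heven
  rw [hB]
  rcases hp : pvPend cs false with _ | _
  · simp only [Bool.false_eq_true, if_false, List.append_nil]
    have hne : ((ridScanA cs false == [' ']) : Bool) = false := by
      rw [beq_eq_false_iff_ne]
      intro hh
      rw [hh] at hNL
      simp at hNL
    rw [hne]
    simp only [Bool.false_eq_true, if_false]
  · simp only [if_true]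
    rcases hl : ridScanA cs false with _ | ⟨a, l'⟩
    · simp
    · have hne : (((a :: l') ++ [' '] == [' ']) : Bool) = false := by
        rw [beq_eq_false_iff_ne]
        intro hh
        have := congrArg List.length hh
        simp at this
      rw [hne]
      simp only [Bool.false_eq_true, if_false, List.getLast?_concat]
      rcases hg : (a :: l').getLast? with _ | c
      · simp at hg
      · have hcs' : c ≠ ' ' := by
          rw [hl, hg] at hNL
          simpa using hNL
        have hcb : ((c == ' ') : Bool) = false := by simp [hcs']
        simp only [hcb, Bool.false_eq_true, if_false]
        simp
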